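-- pv_equiv track=rewrite | github.com/prab786/WRGNN | utils/load_data_vocab.py | find_word_in_vocabulary
-- ===== SOURCE A (Python) =====
-- def find_word_in_vocabulary(partial_word, token2idx, max_results=20):
--     """
--     Find words in vocabulary that match a partial word.
--
--     Args:
--         partial_word (str): Partial word to search for
--         token2idx (dict): Token-to-node index mapping
--         max_results (int): Maximum number of results to return
--
--     Returns:
--         list: List of matching words
--     """
--     partial_word_lower = partial_word.lower()
--     matches = []
--
--     for token in token2idx.keys():
--         token_lower = token.lower()
--         if (partial_word_lower in token_lower or
--             token_lower.startswith(partial_word_lower) or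
--             token_lower.endswith(partial_word_lower)):
--             matches.append(token)
--
--     matches.sort()
--     return matches[:max_results]
-- ===== SOURCE B (Python) =====
-- def find_word_in_vocabulary(partial_word, token2idx, max_results=20):
--     """Single pass: keep a running sorted list by inserting each matching
--     token at its position (the substring test subsumes prefix/suffix)."""
--     needle = partial_word.lower()
--     matches = []
--     for token in token2idx.keys():
--         if needle in token.lower():
--             i = 0
--             while i < len(matches) and matches[i] <= token:
--                 i += 1
--             matches.insert(i, token)
--     return matches[:max_results]
-- ===== Notes on version B (the rewrite author's own statement) =====
-- stated objective: alternative
-- what changed: B collapses A's three-way match test to the single substring test that subsumes it and builds the result sorted incrementally (insert each match at its ordered position in one pass) instead of collecting all matches and then sorting.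
import Mathlib
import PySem

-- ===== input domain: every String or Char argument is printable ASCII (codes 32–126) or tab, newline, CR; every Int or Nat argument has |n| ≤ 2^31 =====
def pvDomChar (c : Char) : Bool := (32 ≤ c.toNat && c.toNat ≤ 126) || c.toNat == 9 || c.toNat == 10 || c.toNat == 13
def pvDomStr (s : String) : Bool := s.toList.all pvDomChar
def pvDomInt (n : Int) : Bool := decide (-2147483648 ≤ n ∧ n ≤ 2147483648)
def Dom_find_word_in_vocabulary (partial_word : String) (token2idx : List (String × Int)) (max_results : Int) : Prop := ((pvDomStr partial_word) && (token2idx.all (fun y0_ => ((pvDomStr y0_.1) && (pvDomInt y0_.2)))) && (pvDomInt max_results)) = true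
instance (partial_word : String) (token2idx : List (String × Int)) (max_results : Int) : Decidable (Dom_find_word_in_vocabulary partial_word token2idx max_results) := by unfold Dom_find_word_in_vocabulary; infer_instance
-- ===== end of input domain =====

-- B replaces A's collect-then-sort (with a redundant three-way match test) by a single pass that
-- keeps the match list sorted by positional insertion; same return value, similar cost (alternative).

-- ===== PORT A =====
def find_word_in_vocabulary (partial_word : String) (token2idx : List (String × Int)) (max_results : Int) : List String :=
  let partial_word_lower := PySem.Str.lower partial_word
  let matchList := (PySem.List.dedup (token2idx.map Prod.fst)).foldl
    (fun acc token =>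
      let token_lower := PySem.Str.lower token
      if PySem.Str.isIn partial_word_lower token_lower
          || PySem.Str.startswith token_lower partial_word_lower
          || PySem.Str.endswith token_lower partial_word_lower
      then acc ++ [token] else acc) []
  PySem.List.slice (PySem.List.sorted matchList (fun x => x) false) none (some max_results)

-- ===== PORT B =====
-- the 'while i < len(matches) and matches[i] <= token: i += 1' scan of Source B
def altInsPos : List String → String → Nat
  | [], _ => 0
  | y :: ys, t => if y ≤ t then altInsPos ys t + 1 else 0

def find_word_in_vocabulary_alt (partial_word : String) (token2idx : List (String × Int)) (max_results : Int) : List String :=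
  let needle := PySem.Str.lower partial_word
  let matchList := (PySem.List.dedup (token2idx.map Prod.fst)).foldl
    (fun ms token =>
      if PySem.Str.isIn needle (PySem.Str.lower token)
      then PySem.List.insert ms ((altInsPos ms token : Nat) : Int) token else ms) []
  PySem.List.slice matchList none (some max_results)

-- ===== PRECONDITION & SPEC =====
def Spec_find_word_in_vocabulary (partial_word : String) (token2idx : List (String × Int)) (max_results : Int) (out : List String) : Prop := out = find_word_in_vocabulary_alt partial_word token2idx max_results
instance (partial_word : String) (token2idx : List (String × Int)) (max_results : Int) (out : List String) : Decidable (Spec_find_word_in_vocabulary partial_word token2idx max_results out) := by unfold Spec_find_word_in_vocabulary; infer_instance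

-- ===== CLAIM (what is proved, stated in full; the proofs are below) =====
def Claim_equal_find_word_in_vocabulary : Prop := ∀ (partial_word : String) (token2idx : List (String × Int)) (max_results : Int), Dom_find_word_in_vocabulary partial_word token2idx max_results → Spec_find_word_in_vocabulary partial_word token2idx max_results (find_word_in_vocabulary partial_word token2idx max_results)

-- ===== LEMMAS AND PROOFS =====

-- the substring test subsumes startswith/endswith
theorem pvCond_eq (pl tl : String) :
    (PySem.Str.isIn pl tl || PySem.Str.startswith tl pl || PySem.Str.endswith tl pl)
      = PySem.Str.isIn pl tl := by
  cases h : PySem.Str.isIn pl tl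
  · have hi : ¬ pl.toList <:+: tl.toList := fun hin => by
      have := (PySem.Str.isIn_iff_infix pl tl).mpr hin
      rw [this] at h; exact Bool.true_eq_false.mp h
    have hs : PySem.Str.startswith tl pl = false := by
      cases hx : PySem.Str.startswith tl pl
      · rfl
      · exact absurd (((PySem.Chars.startswith_iff tl.toList pl.toList).mp hx).isInfix) hi
    have he : PySem.Str.endswith tl pl = false := by
      cases hx : PySem.Str.endswith tl pl
      · rfl
      · exact absurd (((PySem.Chars.endswith_iff tl.toList pl.toList).mp hx).isInfix) hi
    rw [hs, he]; rfl
  · rfl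

theorem altInsPos_le (ms : List String) (t : String) : altInsPos ms t ≤ ms.length := by
  induction ms with
  | nil => simp [altInsPos]
  | cons y ys ih =>
    simp only [altInsPos, List.length_cons]
    split_ifs <;> omega

-- B's positional insertion is exactly the insertBy step of Python's sort characterisation
theorem pvInsort_eq_insertBy (ms : List String) (t : String) :
    PySem.List.insert ms ((altInsPos ms t : Nat) : Int) t
      = PySem.List.insertBy (fun a b => decide (a < b)) t ms := by
  induction ms with
  | nil => rfl
  | cons y ys ih =>
    have hstep : PySem.List.insertBy (fun a b => decide (a < b)) t (y :: ys)
        = if decide (t < y) then t :: y :: ys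
          else y :: PySem.List.insertBy (fun a b => decide (a < b)) t ys := rfl
    by_cases hy : y ≤ t
    · have hle := altInsPos_le ys t
      rw [show altInsPos (y :: ys) t = altInsPos ys t + 1 by simp [altInsPos, hy]]
      rw [PySem.List.insert_natCast _ _ _ (by simpa using Nat.succ_le_succ hle)]
      rw [PySem.List.insert_natCast _ _ _ hle] at ih
      rw [hstep, if_neg (by simpa using not_lt.mpr hy), ← ih]
      simp
    · have hlt : t < y := lt_of_not_ge hy
      rw [show altInsPos (y :: ys) t = 0 by simp [altInsPos, hy]]
      rw [PySem.List.insert_natCast _ 0 _ (by simp)]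
      rw [hstep, if_pos (by simpa using hlt)]
      simp

theorem find_word_in_vocabulary_spec : Claim_equal_find_word_in_vocabulary := by
  intro partial_word token2idx max_results _
  show PySem.List.slice
      (PySem.List.sorted
        ((PySem.List.dedup (token2idx.map Prod.fst)).foldl
          (fun acc token =>
            if PySem.Str.isIn (PySem.Str.lower partial_word) (PySem.Str.lower token)
                || PySem.Str.startswith (PySem.Str.lower token) (PySem.Str.lower partial_word)
                || PySem.Str.endswith (PySem.Str.lower token) (PySem.Str.lower partial_word)
            then acc ++ [token] else acc) [])
        (fun x => x) false) none (some max_results)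
    = PySem.List.slice
        ((PySem.List.dedup (token2idx.map Prod.fst)).foldl
          (fun ms token =>
            if PySem.Str.isIn (PySem.Str.lower partial_word) (PySem.Str.lower token)
            then PySem.List.insert ms ((altInsPos ms token : Nat) : Int) token else ms) [])
        none (some max_results)
  set pl := PySem.Str.lower partial_word with hpl
  set ks := PySem.List.dedup (token2idx.map Prod.fst) with hks
  -- A side: the collected match list is the filtered key list
  have hA : ks.foldl
      (fun acc token =>
        if PySem.Str.isIn pl (PySem.Str.lower token)
            || PySem.Str.startswith (PySem.Str.lower token) pl
            || PySem.Str.endswith (PySem.Str.lower token) pl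
        then acc ++ [token] else acc) []
      = ks.filter (fun token => PySem.Str.isIn pl (PySem.Str.lower token)) := by
    rw [PySem.List.foldl_append_if
      (fun token => PySem.Str.isIn pl (PySem.Str.lower token)
          || PySem.Str.startswith (PySem.Str.lower token) pl
          || PySem.Str.endswith (PySem.Str.lower token) pl)
      (fun x => x) ks []]
    rw [List.filter_congr (fun x _ => pvCond_eq pl (PySem.Str.lower x))]
    rw [List.map_id', List.nil_append]
  -- B side: one-pass sorted insertion = sort of the filtered key list
  have hB : ks.foldl
      (fun ms token =>
        if PySem.Str.isIn pl (PySem.Str.lower token)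
        then PySem.List.insert ms ((altInsPos ms token : Nat) : Int) token else ms) []
      = PySem.List.sorted (ks.filter (fun token => PySem.Str.isIn pl (PySem.Str.lower token)))
          (fun x => x) false := by
    rw [PySem.List.sorted_eq_foldl_insertBy, List.foldl_filter]
    exact (List.foldl_ext _ _ [] (fun ms token _ => by
      rw [pvInsort_eq_insertBy])).symm
  rw [hA, hB]
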